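-- pv_equiv track=rewrite | github.com/mazum01/Hexapod_v2.0 | rPi controller/collision.py | get_leg_phases_tripod
-- ===== SOURCE A (Python) =====
-- from enum import IntEnum
--
-- class LegPhase(IntEnum):
--     """Leg phase in gait cycle."""
--     STANCE = 0   # On ground, low risk
--     SWING = 1    # In air, high risk
--
-- TRIPOD_A_SET = {3, 1, 5}  # RF, LM, RR
--
-- TRIPOD_B_SET = {0, 4, 2}  # LF, RM, LR
--
-- def get_leg_phases_tripod(gait_phase: int) -> list[LegPhase]:
--     """
--     Get leg phases for tripod gait.
--
--     Args:
--         gait_phase: 0 or 1 (alternating tripod phases)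
--
--     Returns:
--         List of 6 LegPhase values (one per leg)
--     """
--     phases = [LegPhase.STANCE] * 6
--
--     if gait_phase == 0:
--         # Tripod A swings: RF(3), LM(1), RR(5)
--         for leg in TRIPOD_A_SET:
--             phases[leg] = LegPhase.SWING
--     else:
--         # Tripod B swings: LF(0), RM(4), LR(2)
--         for leg in TRIPOD_B_SET:
--             phases[leg] = LegPhase.SWING
--
--     return phases
-- ===== SOURCE B (Python) =====
-- from enum import IntEnum
--
-- class LegPhase(IntEnum):
--     STANCE = 0
--     SWING = 1
--
-- def get_leg_phases_tripod(gait_phase: int) -> list[LegPhase]: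
--     # Odd legs {1,3,5} are tripod A, even legs {0,2,4} are tripod B:
--     # derive each leg's phase from its parity instead of index-assigning into a list.
--     swing_parity = 1 if gait_phase == 0 else 0
--     return [LegPhase.SWING if leg % 2 == swing_parity else LegPhase.STANCE
--             for leg in range(6)]
-- ===== Notes on version B (the rewrite author's own statement) =====
-- stated objective: simpler
-- what changed: Replaces the all-STANCE allocation plus index-assignment loop over a membership set by a single comprehension computing each leg's phase from a closed-form parity test (tripod A = odd legs, tripod B = even legs).
import Mathlib
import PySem

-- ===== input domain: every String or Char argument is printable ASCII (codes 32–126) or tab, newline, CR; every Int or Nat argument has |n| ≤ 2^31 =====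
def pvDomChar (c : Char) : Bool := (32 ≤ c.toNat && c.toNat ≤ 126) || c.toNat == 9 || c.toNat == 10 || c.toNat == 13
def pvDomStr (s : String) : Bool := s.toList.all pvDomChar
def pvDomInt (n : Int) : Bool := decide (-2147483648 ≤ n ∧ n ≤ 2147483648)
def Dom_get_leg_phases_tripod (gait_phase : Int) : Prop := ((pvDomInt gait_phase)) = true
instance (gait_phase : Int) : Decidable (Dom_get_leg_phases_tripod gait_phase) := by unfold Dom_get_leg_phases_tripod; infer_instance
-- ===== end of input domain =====

-- B replaces A's all-STANCE list plus index-assignment over a membership set by a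
-- single map over range(6) with a closed-form parity test (objective: simpler).

-- ===== PORT A =====
-- phases = [STANCE]*6; then assign SWING at the set's legs (set {3,1,5} iterates 1,3,5; {0,4,2} iterates 0,2,4)
def get_leg_phases_tripod (gait_phase : Int) : List Int :=
  let phases : List Int := [0, 0, 0, 0, 0, 0]
  if gait_phase == 0 then
    ((phases.set 1 1).set 3 1).set 5 1
  else
    ((phases.set 0 1).set 2 1).set 4 1

-- ===== PORT B =====
def get_leg_phases_tripod_alt (gait_phase : Int) : List Int :=
  let swing_parity : Int := if gait_phase == 0 then 1 else 0
  (PySem.List.pyRange 0 6 1).map (fun leg => if PySem.Int.mod leg 2 == swing_parity then 1 else 0)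

-- ===== PRECONDITION & SPEC =====
def Spec_get_leg_phases_tripod (gait_phase : Int) (out : List Int) : Prop := out = get_leg_phases_tripod_alt gait_phase
instance (gait_phase : Int) (out : List Int) : Decidable (Spec_get_leg_phases_tripod gait_phase out) := by unfold Spec_get_leg_phases_tripod; infer_instance

-- ===== CLAIM (what is proved, stated in full; the proofs are below) =====
def Claim_equal_get_leg_phases_tripod : Prop := ∀ (gait_phase : Int), Dom_get_leg_phases_tripod gait_phase → Spec_get_leg_phases_tripod gait_phase (get_leg_phases_tripod gait_phase)

-- ===== LEMMAS AND PROOFS =====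

-- ===== VERDICT (by name: the statement is the Claim_ definition above) =====
theorem get_leg_phases_tripod_spec : Claim_equal_get_leg_phases_tripod := by
  intro g _
  unfold Spec_get_leg_phases_tripod get_leg_phases_tripod get_leg_phases_tripod_alt
  by_cases h : g = 0 <;> simp [h] <;> decide
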